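-- pv_equiv track=rewrite | github.com/soodaayush/canadian-computing-competition | 2023/specialEvent.py | specialEvent
-- ===== SOURCE A (Python) =====
-- def specialEvent(people, list):
--     days = []
--     result = []
--
--     for i in list:
--         days.append(i.count("Y"))
--
--     day = max(days)
--
--     for index, item in enumerate(days):
--         if item == day:
--             result.append(index + 1)
--
--     return result
-- ===== SOURCE B (Python) =====
-- def specialEvent(people, list):
--     # Single pass: track the best 'Y' count seen so far and the 1-based
--     # indices that achieve it; no intermediate counts list, no second pass.
--     best = -1
--     result = []
--     for index, item in enumerate(list):
--         c = item.count("Y")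
--         if c > best:
--             best = c
--             result = [index + 1]
--         elif c == best:
--             result.append(index + 1)
--     return result
-- ===== Notes on version B (the rewrite author's own statement) =====
-- stated objective: simpler
-- what changed: Replaces A's two passes (build a counts list, take max, then rescan with enumerate) by a single enumerate pass maintaining the running best count and the index list achieving it.
import Mathlib
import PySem

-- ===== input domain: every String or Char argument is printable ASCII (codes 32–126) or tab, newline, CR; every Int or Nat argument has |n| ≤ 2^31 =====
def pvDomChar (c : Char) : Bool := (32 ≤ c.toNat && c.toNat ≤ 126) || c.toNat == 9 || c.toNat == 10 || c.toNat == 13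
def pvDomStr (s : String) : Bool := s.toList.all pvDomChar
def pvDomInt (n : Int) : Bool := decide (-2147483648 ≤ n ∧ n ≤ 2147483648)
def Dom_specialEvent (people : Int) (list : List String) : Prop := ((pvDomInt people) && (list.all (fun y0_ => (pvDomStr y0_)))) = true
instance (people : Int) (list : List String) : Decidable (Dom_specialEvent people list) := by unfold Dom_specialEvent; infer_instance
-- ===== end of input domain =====

-- B replaces A's two passes (counts list + max + rescan) by one enumerate pass
-- keeping the running best count and the indices achieving it (simpler: one pass).

-- ===== PORT A =====
def specialEvent (people : Int) (list : List String) : List Int :=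
  let days : List Int := list.foldl (fun acc i => acc ++ [((PySem.Str.count i "Y" : Nat) : Int)]) []
  match PySem.List.max? days (fun y => y) with
  | none => []   -- unreachable under Pre_ (Python raises ValueError here)
  | some day =>
    (PySem.List.enumerate days).foldl
      (fun result p => if p.2 == day then result ++ [p.1 + 1] else result) []

-- ===== PORT B =====
def specialEvent_alt (people : Int) (list : List String) : List Int :=
  ((PySem.List.enumerate list).foldl
    (fun st p =>
      let c : Int := ((PySem.Str.count p.2 "Y" : Nat) : Int)
      if c > st.1 then (c, [p.1 + 1])
      else if c == st.1 then (st.1, st.2 ++ [p.1 + 1])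
      else st)
    ((-1 : Int), ([] : List Int))).2

-- ===== PRECONDITION & SPEC =====
-- Pre_ excludes only the empty list, on which A's max([]) raises ValueError.
def Pre_specialEvent (people : Int) (list : List String) : Prop := list ≠ []
instance (people : Int) (list : List String) : Decidable (Pre_specialEvent people list) := by unfold Pre_specialEvent; infer_instance
def pvWitness_specialEvent : Int × List String := (3, ["YNY", "NNN"])

def Spec_specialEvent (people : Int) (list : List String) (out : List Int) : Prop := out = specialEvent_alt people list
instance (people : Int) (list : List String) (out : List Int) : Decidable (Spec_specialEvent people list out) := by unfold Spec_specialEvent; infer_instance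

-- ===== CLAIM (what is proved, stated in full; the proofs are below) =====
def Claim_equal_specialEvent : Prop := ∀ (people : Int) (list : List String), Dom_specialEvent people list → Pre_specialEvent people list → Spec_specialEvent people list (specialEvent people list)
-- ===== LEMMAS AND PROOFS =====

-- value of a string: its 'Y' count as an Int (nonnegative by construction)
def pvCnt (s : String) : Int := ((PySem.Str.count s "Y" : Nat) : Int)

-- indices (1-based, offset s) of elements whose value is M, structurally
def pvFilt {α : Type} (v : α → Int) : List α → Int → Int → List Int
  | [], _, _ => []
  | c :: t, s, M => (if v c = M then [s + 1] else []) ++ pvFilt v t (s + 1) M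

-- running max of the values over b
def pvMx {α : Type} (v : α → Int) (l : List α) (b : Int) : Int :=
  l.foldl (fun m x => max m (v x)) b

theorem pvMx_ge {α : Type} (v : α → Int) (l : List α) (b : Int) : b ≤ pvMx v l b := by
  induction l generalizing b with
  | nil => simp [pvMx]
  | cons c t ih =>
    have := ih (max b (v c))
    simp only [pvMx, List.foldl_cons] at *
    exact le_trans (le_max_left _ _) this

-- A's second loop, accumulator pulled out, equals pvFilt
theorem pvFoldA_eq {α : Type} (v : α → Int) (l : List α) (M : Int) :
    ∀ (s : Int) (a : List Int),
    (PySem.List.enumerate l s).foldl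
      (fun r p => if v p.2 == M then r ++ [p.1 + 1] else r) a
    = a ++ pvFilt v l s M := by
  induction l with
  | nil => intro s a; simp [pvFilt, PySem.List.enumerate_nil]
  | cons c t ih =>
    intro s a
    simp only [PySem.List.enumerate_cons, List.foldl_cons, pvFilt, beq_iff_eq]
    simp only [beq_iff_eq] at ih
    by_cases h : v c = M <;> simp [h, ih]

-- A's first loop (append one count per element) builds the map
theorem pvDays_eq (l : List String) :
    ∀ (a : List Int),
    l.foldl (fun acc i => acc ++ [((PySem.Str.count i "Y" : Nat) : Int)]) a
    = a ++ l.map pvCnt := by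
  induction l with
  | nil => intro a; simp
  | cons c t ih =>
    intro a
    rw [List.foldl_cons, ih]
    simp [pvCnt]

theorem pvFilt_map (l : List String) (s M : Int) :
    pvFilt (fun y => y) (l.map pvCnt) s M = pvFilt pvCnt l s M := by
  induction l generalizing s with
  | nil => simp [pvFilt]
  | cons c t ih => simp [pvFilt, ih]

-- core invariant of B's single pass
theorem pvB_inv {α : Type} (v : α → Int) (l : List α) :
    ∀ (s best : Int) (r : List Int),
    ((PySem.List.enumerate l s).foldl
      (fun st p =>
        if v p.2 > st.1 then (v p.2, [p.1 + 1])
        else if v p.2 == st.1 then (st.1, st.2 ++ [p.1 + 1])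
        else st)
      (best, r)).2
    = (if pvMx v l best = best then r else []) ++ pvFilt v l s (pvMx v l best) := by
  induction l with
  | nil => intro s best r; simp [pvMx, pvFilt, PySem.List.enumerate_nil]
  | cons c t ih =>
    intro s best r
    simp only [PySem.List.enumerate_cons, List.foldl_cons, pvMx, pvFilt, beq_iff_eq]
    by_cases h1 : v c > best
    · simp only [if_pos h1]
      have hm : max best (v c) = v c := max_eq_right (le_of_lt h1)
      simp only [hm]
      have := ih (s + 1) (v c) [s + 1]
      simp only [pvMx, beq_iff_eq] at this
      rw [this]
      have hMge : v c ≤ pvMx v t (v c) := pvMx_ge v t (v c)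
      by_cases h2 : pvMx v t (v c) = best
      · omega
      · simp only [pvMx] at h2 ⊢
        by_cases h3 : t.foldl (fun m x => max m (v x)) (v c) = v c
        · simp [h2, h3]
          exact fun h => absurd h (by omega)
        · have : ¬ v c = t.foldl (fun m x => max m (v x)) (v c) := fun h => h3 h.symm
          simp [h2, h3, this]
    · simp only [if_neg h1]
      have hm : max best (v c) = best := max_eq_left (by omega)
      simp only [hm]
      by_cases h2 : v c = best
      · rw [if_pos h2]
        have := ih (s + 1) best (r ++ [s + 1])
        simp only [pvMx, beq_iff_eq] at this ⊢
        rw [this]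
        have hMge : best ≤ t.foldl (fun m x => max m (v x)) best := pvMx_ge v t best
        by_cases h3 : t.foldl (fun m x => max m (v x)) best = best
        · simp [h3, h2]
        · have : ¬ v c = t.foldl (fun m x => max m (v x)) best := by omega
          simp [h3, this]
      · rw [if_neg h2]
        have := ih (s + 1) best r
        simp only [pvMx, beq_iff_eq] at this ⊢
        rw [this]
        have hMge : best ≤ t.foldl (fun m x => max m (v x)) best := pvMx_ge v t best
        have : ¬ v c = t.foldl (fun m x => max m (v x)) best := by omega
        simp [this]

-- B's fold over enumerated strings is the generic fold with v = pvCnt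
theorem pvB_eq (l : List String) :
    specialEvent_alt 0 l = ((PySem.List.enumerate l 0).foldl
      (fun st p =>
        if pvCnt p.2 > st.1 then (pvCnt p.2, [p.1 + 1])
        else if pvCnt p.2 == st.1 then (st.1, st.2 ++ [p.1 + 1])
        else st)
      ((-1 : Int), ([] : List Int))).2 := by
  rfl

-- pvMx over map = pvMx with v
theorem pvMx_map (l : List String) (b : Int) :
    pvMx (fun y => y) (l.map pvCnt) b = pvMx pvCnt l b := by
  induction l generalizing b with
  | nil => rfl
  | cons c t ih => simp [pvMx, List.foldl_cons] at *; exact ih _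

theorem specialEvent_alt_people (p q : Int) (l : List String) :
    specialEvent_alt p l = specialEvent_alt q l := rfl

-- ===== VERDICT (by name: the statement is the Claim_ definition above) =====
theorem specialEvent_spec : Claim_equal_specialEvent := by
  intro people list _ hpre
  unfold Spec_specialEvent
  obtain ⟨c, t, rfl⟩ : ∃ c t, list = c :: t := by
    cases list with
    | nil => exact absurd rfl hpre
    | cons c t => exact ⟨c, t, rfl⟩
  -- A's side
  show specialEvent people (c :: t) = _
  unfold specialEvent
  rw [pvDays_eq]
  simp only [List.nil_append, List.map_cons]
  rw [PySem.List.max?_id_cons]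
  simp only
  rw [pvFoldA_eq (fun y => y) (pvCnt c :: t.map pvCnt)]
  simp only [List.nil_append]
  -- B's side via the invariant
  have hB := pvB_inv pvCnt (c :: t) 0 (-1) []
  rw [specialEvent_alt_people people 0, pvB_eq, hB]
  -- the initial best -1 is strictly below every count, so the reset always fires
  have hc : (0 : Int) ≤ pvCnt c := by simp [pvCnt]
  have hmx : pvMx pvCnt (c :: t) (-1) = pvMx pvCnt t (pvCnt c) := by
    have h : max (-1 : Int) (pvCnt c) = pvCnt c := max_eq_right (by omega)
    simp only [pvMx, List.foldl_cons, h]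
  have hge : pvCnt c ≤ pvMx pvCnt t (pvCnt c) := pvMx_ge pvCnt t (pvCnt c)
  have hne : pvMx pvCnt (c :: t) (-1) ≠ -1 := by rw [hmx]; omega
  rw [if_neg hne, List.nil_append, hmx]
  -- both sides: pvFilt over (c :: t), values via map on the A side
  have : (t.map pvCnt).foldl (fun m x => max m x) (pvCnt c) = pvMx pvCnt t (pvCnt c) := by
    have := pvMx_map t (pvCnt c)
    simpa [pvMx] using this
  rw [show ((t.map pvCnt).foldl max (pvCnt c)) = pvMx pvCnt t (pvCnt c) from this]
  have := pvFilt_map (c :: t) 0 (pvMx pvCnt t (pvCnt c))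
  simpa [List.map_cons] using this
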